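-- pv_equiv track=rewrite | github.com/Sun950/SEO3 | src/corpus_builder.py | ngrammize
-- ===== SOURCE A (Python) =====
-- def find_ngram(a_text, n):
--     return list(zip(*[a_text[i:] for i in range(n)]))
--
-- def ngrammize(a_text):
--     d_gram = {}
--     for n in range(2, 7):
--       ngram = find_ngram(a_text, n)
--       for gram in ngram:
--         value = ' '.join(gram)
--         if value in d_gram:
--           d_gram[value] += 1
--         else:
--           d_gram[value] = 1
--     return d_gram
-- ===== SOURCE B (Python) =====
-- def chain_keys(key, toks):
--     out = []
--     for tok in toks:
--         key = key + ' ' + tok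
--         out.append(key)
--     return out
--
-- def ngrammize(a_text):
--     buckets = ([], [], [], [], [])
--     for i in range(len(a_text)):
--         keys = chain_keys(a_text[i], a_text[i + 1 : i + 6])
--         for k in range(len(keys)):
--             buckets[k].append(keys[k])
--     counts = {}
--     for bucket in buckets:
--         for key in bucket:
--             counts[key] = counts.get(key, 0) + 1
--     return counts
-- ===== Notes on version B (the rewrite author's own statement) =====
-- stated objective: alternative
-- what changed: A makes five separate passes, one per gram length, each building a zip of n shifted slices and joining every tuple; B makes a single position-outer pass that extends each gram key incrementally (key = key + ' ' + next token) into per-length buckets and then counts the buckets, so no tuple lists or per-gram re-joins are built.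
import Mathlib
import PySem

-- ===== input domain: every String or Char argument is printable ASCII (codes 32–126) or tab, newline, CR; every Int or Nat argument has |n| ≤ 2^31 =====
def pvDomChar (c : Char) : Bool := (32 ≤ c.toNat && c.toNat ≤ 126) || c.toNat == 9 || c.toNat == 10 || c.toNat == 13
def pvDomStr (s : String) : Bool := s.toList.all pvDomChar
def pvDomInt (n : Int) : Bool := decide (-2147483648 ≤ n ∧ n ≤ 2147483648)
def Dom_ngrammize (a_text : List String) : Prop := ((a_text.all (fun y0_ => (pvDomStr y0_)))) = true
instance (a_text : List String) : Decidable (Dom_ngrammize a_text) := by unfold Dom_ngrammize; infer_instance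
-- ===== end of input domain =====

-- B replaces A's per-length zip-of-slices passes by a single position-outer pass that extends each
-- gram key incrementally into per-length buckets (same dict, same insertion order); a structural
-- alternative of similar cost.

-- ===== PORT A =====
-- termination measure for zipN (cited by its decreasing_by)
lemma pvSumTailLt (lls : List (List String)) (h1 : lls ≠ []) (h2 : ∀ l ∈ lls, l ≠ []) :
    ((lls.map List.tail).map List.length).sum < (lls.map List.length).sum := by
  match lls with
  | [] => exact absurd rfl h1
  | l :: rest =>
    have hl : l ≠ [] := h2 l (by simp)
    have h3 : ((rest.map List.tail).map List.length).sum ≤ (rest.map List.length).sum := by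
      rw [List.map_map]
      exact List.sum_le_sum (fun x _ => by simp [Function.comp, List.length_tail])
    have h4 : l.tail.length < l.length := by
      cases l with
      | nil => exact absurd rfl hl
      | cons a t => simp
    simp only [List.map_cons, List.sum_cons]
    omega

-- zip(*lists): while all lists are nonempty take the tuple of heads (the headD default is never
-- read: the guard guarantees every list is nonempty)
def zipN (lls : List (List String)) : List (List String) :=
  if h : lls ≠ [] ∧ ∀ l ∈ lls, l ≠ [] then
    (lls.map (fun l => l.headD "")) :: zipN (lls.map List.tail)
  else []
termination_by (lls.map List.length).sum
decreasing_by simpa using pvSumTailLt lls h.1 h.2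

def find_ngram (a_text : List String) (n : Int) : List (List String) :=
  zipN ((PySem.List.pyRange 0 n 1).map (fun i => PySem.List.slice a_text (some i) none))

def ngrammize (a_text : List String) : List (String × Int) :=
  ((PySem.List.pyRange 2 7 1).foldl (fun d n =>
      (find_ngram a_text n).foldl (fun d gram =>
        let value := PySem.Str.join " " gram
        if d.contains value then d.modify value 0 (· + 1) else d.insert value 1) d)
    PySem.Dict.empty).items

-- ===== PORT B =====
-- chain_keys: joined extensions of key by each further token, one per extra token
def chainKeys : String → List String → List String
  | _, [] => []
  | key, tok :: toks =>
    let key' := key ++ " " ++ tok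
    key' :: chainKeys key' toks

-- 'for k in range(len(keys)): buckets[k].append(keys[k])' (len keys ≤ len buckets always)
def appendEach : List (List String) → List String → List (List String)
  | bks, [] => bks
  | [], _ :: _ => []
  | b :: bks, key :: keys => (b ++ [key]) :: appendEach bks keys

def ngrammize_alt (a_text : List String) : List (String × Int) :=
  let bks := (PySem.List.pyRange 0 (a_text.length : Int) 1).foldl
      (fun bks i =>
        appendEach bks (chainKeys (PySem.List.pyGetD a_text i "")
          (PySem.List.slice a_text (some (i + 1)) (some (i + 6)))))
      [[], [], [], [], []]
  (bks.foldl (fun counts bucket =>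
      bucket.foldl (fun counts key => counts.insert key (counts.getD key 0 + 1)) counts)
    PySem.Dict.empty).items

-- ===== PRECONDITION & SPEC =====
def Spec_ngrammize (a_text : List String) (out : List (String × Int)) : Prop := out = ngrammize_alt a_text
instance (a_text : List String) (out : List (String × Int)) : Decidable (Spec_ngrammize a_text out) := by unfold Spec_ngrammize; infer_instance

-- ===== CLAIM (what is proved, stated in full; the proofs are below) =====
def Claim_equal_ngrammize : Prop := ∀ (a_text : List String), Dom_ngrammize a_text → Spec_ngrammize a_text (ngrammize a_text)

-- ===== LEMMAS AND PROOFS =====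

-- the ' '-joined n-grams of a, in start-position order
def gramsKeys (n : Nat) : List String → List String
  | [] => []
  | w :: rest =>
    if rest.length + 1 < n then []
    else PySem.Str.join " " ((w :: rest).take n) :: gramsKeys n rest

lemma gramsKeys_nil_of_short (n : Nat) : ∀ (a : List String), a.length < n → gramsKeys n a = [] := by
  intro a
  induction a with
  | nil => intro _; rfl
  | cons w rest ih => intro h; simp at h; simp [gramsKeys, h]

lemma gramsKeys_cons (n : Nat) (w : String) (rest : List String) :
    gramsKeys n (w :: rest) =
      (if rest.length + 1 < n then [] else [PySem.Str.join " " ((w :: rest).take n)])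
        ++ gramsKeys n rest := by
  by_cases h : rest.length + 1 < n
  · simp [gramsKeys, h, gramsKeys_nil_of_short n rest (by omega)]
  · simp [gramsKeys, h]

lemma chars_join_snoc : ∀ (ps : List (List Char)) (w : List Char), ps ≠ [] →
    PySem.Chars.join [' '] (ps ++ [w]) = PySem.Chars.join [' '] ps ++ [' '] ++ w
  | [], _, h => absurd rfl h
  | [p], w, _ => by
    simp [PySem.Chars.join_cons_cons, PySem.Chars.join_singleton]
  | p :: q :: r, w, _ => by
    have ih := chars_join_snoc (q :: r) w (by simp)
    simp only [List.cons_append] at ih ⊢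
    rw [PySem.Chars.join_cons_cons, PySem.Chars.join_cons_cons, ih]
    simp [List.append_assoc]

lemma join_snoc (ps : List String) (w : String) (h : ps ≠ []) :
    PySem.Str.join " " (ps ++ [w]) = PySem.Str.join " " ps ++ " " ++ w := by
  apply String.toList_inj.mp
  simp only [String.toList_append, PySem.Str.toList_join, List.map_append, List.map_cons,
    List.map_nil]
  have hsep : (" " : String).toList = [' '] := rfl
  rw [hsep]
  exact chars_join_snoc (ps.map String.toList) w.toList (by simp [h])

lemma join_one (w : String) : PySem.Str.join " " [w] = w := by
  apply String.toList_inj.mp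
  simp [PySem.Str.toList_join, PySem.Chars.join_singleton]

lemma join2 (a b : String) : PySem.Str.join " " [a, b] = a ++ " " ++ b := by
  rw [show [a, b] = [a] ++ [b] from rfl, join_snoc _ _ (by simp), join_one]

lemma join3 (a b c : String) : PySem.Str.join " " [a, b, c] = a ++ " " ++ b ++ " " ++ c := by
  rw [show [a, b, c] = [a, b] ++ [c] from rfl, join_snoc _ _ (by simp), join2]

lemma join4 (a b c d : String) :
    PySem.Str.join " " [a, b, c, d] = a ++ " " ++ b ++ " " ++ c ++ " " ++ d := by
  rw [show [a, b, c, d] = [a, b, c] ++ [d] from rfl, join_snoc _ _ (by simp), join3]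

lemma join5 (a b c d e : String) :
    PySem.Str.join " " [a, b, c, d, e] = a ++ " " ++ b ++ " " ++ c ++ " " ++ d ++ " " ++ e := by
  rw [show [a, b, c, d, e] = [a, b, c, d] ++ [e] from rfl, join_snoc _ _ (by simp), join4]

lemma join6 (a b c d e f : String) :
    PySem.Str.join " " [a, b, c, d, e, f]
      = a ++ " " ++ b ++ " " ++ c ++ " " ++ d ++ " " ++ e ++ " " ++ f := by
  rw [show [a, b, c, d, e, f] = [a, b, c, d, e] ++ [f] from rfl, join_snoc _ _ (by simp), join5]

-- one position's incremental keys, filed into the five buckets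
lemma appendEach_chain (w : String) (rest b2 b3 b4 b5 b6 : List String) :
    appendEach [b2, b3, b4, b5, b6] (chainKeys w (rest.take 5)) =
      [b2 ++ (if rest.length + 1 < 2 then [] else [PySem.Str.join " " ((w :: rest).take 2)]),
       b3 ++ (if rest.length + 1 < 3 then [] else [PySem.Str.join " " ((w :: rest).take 3)]),
       b4 ++ (if rest.length + 1 < 4 then [] else [PySem.Str.join " " ((w :: rest).take 4)]),
       b5 ++ (if rest.length + 1 < 5 then [] else [PySem.Str.join " " ((w :: rest).take 5)]),
       b6 ++ (if rest.length + 1 < 6 then [] else [PySem.Str.join " " ((w :: rest).take 6)])] := by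
  match rest with
  | [] => simp [chainKeys, appendEach]
  | [t1] => simp [chainKeys, appendEach, join2]
  | [t1, t2] => simp [chainKeys, appendEach, join2, join3]
  | [t1, t2, t3] => simp [chainKeys, appendEach, join2, join3, join4]
  | [t1, t2, t3, t4] => simp [chainKeys, appendEach, join2, join3, join4, join5]
  | t1 :: t2 :: t3 :: t4 :: t5 :: r =>
    simp only [List.take_succ_cons, List.take_zero, List.length_cons]
    rw [if_neg (by omega), if_neg (by omega), if_neg (by omega), if_neg (by omega),
      if_neg (by omega)]
    simp [chainKeys, appendEach, join2, join3, join4, join5, join6]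

-- structural form of B's bucket-filling loop
def fillB : List (List String) → List String → List (List String)
  | bks, [] => bks
  | bks, w :: rest => fillB (appendEach bks (chainKeys w (rest.take 5))) rest

lemma fillB_eq : ∀ (a : List String) (b2 b3 b4 b5 b6 : List String),
    fillB [b2, b3, b4, b5, b6] a =
      [b2 ++ gramsKeys 2 a, b3 ++ gramsKeys 3 a, b4 ++ gramsKeys 4 a,
       b5 ++ gramsKeys 5 a, b6 ++ gramsKeys 6 a] := by
  intro a
  induction a with
  | nil => intro b2 b3 b4 b5 b6; simp [fillB, gramsKeys]
  | cons w rest ih =>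
    intro b2 b3 b4 b5 b6
    show fillB (appendEach [b2, b3, b4, b5, b6] (chainKeys w (rest.take 5))) rest = _
    rw [appendEach_chain, ih,
      gramsKeys_cons 2, gramsKeys_cons 3, gramsKeys_cons 4, gramsKeys_cons 5, gramsKeys_cons 6]
    simp [List.append_assoc]

-- B's index loop is fillB on the corresponding suffix
lemma loop_fillB (a : List String) : ∀ (k j : Nat), a.length - j = k → ∀ (bks : List (List String)),
    (PySem.List.pyRange (j : Int) (a.length : Int) 1).foldl
      (fun bks i =>
        appendEach bks (chainKeys (PySem.List.pyGetD a i "")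
          (PySem.List.slice a (some (i + 1)) (some (i + 6))))) bks
    = fillB bks (a.drop j) := by
  intro k
  induction k with
  | zero =>
    intro j hj bks
    have hle : a.length ≤ j := by omega
    rw [PySem.List.pyRange_one_eq_nil (by exact_mod_cast hle)]
    rw [List.drop_eq_nil_of_le hle]
    rfl
  | succ k ih =>
    intro j hj bks
    have hjlt : j < a.length := by omega
    rw [PySem.List.pyRange_one_cons (by exact_mod_cast hjlt)]
    simp only [List.foldl_cons]
    have e1 : PySem.List.pyGetD a (j : Int) "" = a[j] := by
      rw [PySem.List.pyGetD_natCast, List.getD_eq_getElem a "" hjlt]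
    have e2 : PySem.List.slice a (some ((j : Int) + 1)) (some ((j : Int) + 6))
        = (a.drop (j + 1)).take 5 := by
      have h := PySem.List.slice_natCast a (j + 1) (j + 6)
      push_cast at h
      rw [h]
      congr 1
      omega
    rw [e1, e2, show ((j : Int) + 1) = ((j + 1 : Nat) : Int) by push_cast; ring,
      ih (j + 1) (by omega)]
    rw [List.drop_eq_getElem_cons hjlt]
    rfl

-- heads of the n successive drops are the first n elements
lemma heads_take (a : List String) (n : Nat) (h : n ≤ a.length) :
    (List.range n).map (fun i => (a.drop i).headD "") = a.take n := by
  apply List.ext_getElem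
  · simp [h]
  · intro i h1 h2
    simp only [List.getElem_map, List.getElem_range, List.getElem_take]
    have hi : i < a.length := by simp at h1; omega
    rw [List.drop_eq_getElem_cons hi]
    rfl

-- A's zip-of-slices, joined, is the canonical n-gram key list
lemma zipN_grams (n : Nat) (hn : 1 ≤ n) : ∀ (a : List String),
    (zipN ((List.range n).map (fun i => a.drop i))).map (PySem.Str.join " ") = gramsKeys n a := by
  intro a
  induction a with
  | nil =>
    rw [zipN, dif_neg]
    · rfl
    · rintro ⟨_, h2⟩
      exact (h2 [] (List.mem_map.mpr ⟨0, List.mem_range.mpr (by omega), by simp⟩)) rfl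
  | cons w rest ih =>
    by_cases hlen : rest.length + 1 < n
    · rw [zipN, dif_neg]
      · simp [gramsKeys, hlen]
      · rintro ⟨_, h2⟩
        refine (h2 ((w :: rest).drop (n - 1))
          (List.mem_map.mpr ⟨n - 1, List.mem_range.mpr (by omega), rfl⟩)) ?_
        apply List.drop_eq_nil_of_le
        simp
        omega
    · rw [zipN, dif_pos ?pos]
      case pos =>
        refine ⟨by simp [List.range_eq_nil]; omega, ?_⟩
        intro l hl
        obtain ⟨i, hi, rfl⟩ := List.mem_map.mp hl
        have hin : i < n := List.mem_range.mp hi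
        intro hnil
        have := List.drop_eq_nil_iff.mp hnil
        simp at this
        omega
      have htails : ((List.range n).map (fun i => (w :: rest).drop i)).map List.tail
          = (List.range n).map (fun i => rest.drop i) := by
        simp only [List.map_map]
        apply List.map_congr_left
        intro i _
        simp [List.tail_drop]
      have hheads : ((List.range n).map (fun i => (w :: rest).drop i)).map (fun l => l.headD "")
          = (w :: rest).take n := by
        rw [List.map_map]
        exact heads_take (w :: rest) n (by simp; omega)
      simp only [List.map_cons, htails, hheads, ih]
      simp [gramsKeys, hlen]

lemma find_ngram_eq (a : List String) (n : Nat) :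
    find_ngram a (n : Int) = zipN ((List.range n).map (fun i => a.drop i)) := by
  unfold find_ngram
  rw [PySem.List.pyRange_zero_nat, List.map_map]
  congr 1
  apply List.map_congr_left
  intro i _
  exact PySem.List.slice_from_natCast a i

-- A's branching counter step is B's get-default counter step
lemma stepA_eq (d : PySem.Dict String Int) (v : String) :
    (if d.contains v then d.modify v 0 (· + 1) else d.insert v 1)
      = d.insert v (d.getD v 0 + 1) := by
  by_cases h : d.contains v
  · simp [h, PySem.Dict.modify]
  · simp only [Bool.not_eq_true] at h
    rw [if_neg (by simp [h]), PySem.Dict.getD_of_not_contains d 0 h]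
    norm_num

lemma foldl_join_insert (l : List (List String)) :
    ∀ (d : PySem.Dict String Int),
      l.foldl (fun d gram =>
          let value := PySem.Str.join " " gram
          if d.contains value then d.modify value 0 (· + 1) else d.insert value 1) d
        = (l.map (PySem.Str.join " ")).foldl
            (fun d key => d.insert key (d.getD key 0 + 1)) d := by
  induction l with
  | nil => intro d; rfl
  | cons g t ih =>
    intro d
    simp only [List.map_cons, List.foldl_cons]
    rw [stepA_eq, ih]

lemma innerA (a : List String) (n : Nat) (hn : 1 ≤ n) (d : PySem.Dict String Int) :
    (find_ngram a (n : Int)).foldl (fun d gram =>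
        let value := PySem.Str.join " " gram
        if d.contains value then d.modify value 0 (· + 1) else d.insert value 1) d
      = (gramsKeys n a).foldl (fun d key => d.insert key (d.getD key 0 + 1)) d := by
  rw [find_ngram_eq, foldl_join_insert, zipN_grams n hn a]

lemma ngrammize_eq_alt (a : List String) : ngrammize a = ngrammize_alt a := by
  unfold ngrammize ngrammize_alt
  rw [show PySem.List.pyRange 2 7 1 = [2, 3, 4, 5, 6] from by decide]
  have h0 := loop_fillB a a.length 0 (by omega)
    [[], [], [], [], []]
  simp only [Nat.cast_zero, List.drop_zero] at h0
  rw [h0, fillB_eq, ]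
  simp only [List.nil_append, List.foldl_cons, List.foldl_nil]
  have h2 := innerA a 2 (by omega)
  have h3 := innerA a 3 (by omega)
  have h4 := innerA a 4 (by omega)
  have h5 := innerA a 5 (by omega)
  have h6 := innerA a 6 (by omega)
  norm_num at h2 h3 h4 h5 h6
  rw [h2, h3, h4, h5, h6]

-- ===== VERDICT (by name: the statement is the Claim_ definition above) =====
theorem ngrammize_spec : Claim_equal_ngrammize := by
  intro a_text _
  show ngrammize a_text = ngrammize_alt a_text
  exact ngrammize_eq_alt a_text
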